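-- pv_equiv track=rewrite | github.com/Golovanov399/icfpc2020 | interact.py | modulate_int
-- ===== SOURCE A (Python) =====
-- def modulate_int(n):
-- 	if n == 0:
-- 		return "010"
-- 	res = ""
-- 	if n >= 0:
-- 		res += "01"
-- 	else:
-- 		res += "10"
-- 		n = -n
-- 	sz = 0
-- 	while n + 1 > 16 ** sz:
-- 		sz += 1
-- 	res += '1' * sz + '0'
-- 	res += bin(n)[2:].rjust(4 * sz, '0')
-- 	return res
-- ===== SOURCE B (Python) =====
-- def modulate_int(n):
--     if n == 0:
--         return "010"
--     sign = "01" if n >= 0 else "10"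
--     m = abs(n)
--     sz = (m.bit_length() + 3) // 4
--     return sign + "1" * sz + "0" + format(m, "0%db" % (4 * sz))
-- ===== Notes on version B (the rewrite author's own statement) =====
-- stated objective: idiomatic
-- what changed: B computes the nibble count arithmetically from the absolute value's bit length instead of A's incremental search loop over growing powers of sixteen, and emits the digits with a zero-padded binary format call instead of manual rjust assembly.
import Mathlib
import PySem

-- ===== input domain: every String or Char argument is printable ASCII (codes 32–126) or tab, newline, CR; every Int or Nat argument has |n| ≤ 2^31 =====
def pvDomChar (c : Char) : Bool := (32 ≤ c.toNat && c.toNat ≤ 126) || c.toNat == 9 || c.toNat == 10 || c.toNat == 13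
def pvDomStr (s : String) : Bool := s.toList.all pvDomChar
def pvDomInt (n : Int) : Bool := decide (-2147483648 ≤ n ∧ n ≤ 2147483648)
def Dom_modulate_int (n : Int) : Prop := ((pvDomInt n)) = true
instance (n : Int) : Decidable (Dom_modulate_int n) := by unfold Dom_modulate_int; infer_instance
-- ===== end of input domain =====

-- B replaces A's `while n + 1 > 16 ** sz` search loop by the closed form (bit_length + 3) // 4 (idiomatic).

-- ===== PORT A =====
-- A's while loop: increment sz while n + 1 > 16 ** sz
def modFindSz (n : Int) (sz : Nat) : Nat :=
  if n + 1 > (16 : Int) ^ sz then modFindSz n (sz + 1) else sz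
termination_by (n + 1).toNat - 16 ^ sz
decreasing_by
  have h16 : (16 : Nat) ^ sz < 16 ^ (sz + 1) :=
    Nat.pow_lt_pow_succ (by norm_num)
  have hc : (16 : Nat) ^ sz < (n + 1).toNat := by
    have : ((16 : Nat) ^ sz : Int) < n + 1 := by push_cast; omega
    omega
  omega

-- bin(n)[2:] for n ≥ 1 (binary digits, most significant first)
def modulate_int (n : Int) : String :=
  if n = 0 then "010"
  else
    let (res, n) := if n ≥ 0 then ("01", n) else ("10", -n)
    let sz := modFindSz n 0
    let digits := Nat.toDigits 2 n.toNat
    res ++ String.ofList (List.replicate sz '1') ++ "0"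
        ++ String.ofList (List.replicate (4 * sz - digits.length) '0' ++ digits)

-- ===== PORT B =====
def modulate_int_alt (n : Int) : String :=
  if n = 0 then "010"
  else
    let sign := if n ≥ 0 then "01" else "10"
    let m := n.natAbs
    let sz := (Nat.size m + 3) / 4       -- (m.bit_length() + 3) // 4
    let digits := Nat.toDigits 2 m       -- format(m, '0<4sz>b') = zero-padded binary
    sign ++ String.ofList (List.replicate sz '1') ++ "0"
         ++ String.ofList (List.replicate (4 * sz - digits.length) '0' ++ digits)

-- ===== PRECONDITION & SPEC =====
def Spec_modulate_int (n : Int) (out : String) : Prop := out = modulate_int_alt n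
instance (n : Int) (out : String) : Decidable (Spec_modulate_int n out) := by unfold Spec_modulate_int; infer_instance

-- ===== CLAIM (what is proved, stated in full; the proofs are below) =====
def Claim_equal_modulate_int : Prop := ∀ (n : Int), Dom_modulate_int n → Spec_modulate_int n (modulate_int n)

-- ===== LEMMAS AND PROOFS =====

-- the loop condition, over Nat: n + 1 > 16^sz  ↔  sz < (size n + 3) / 4
lemma modFindSz_cond (m sz : Nat) (_hm : 1 ≤ m) :
    ((m : Int) + 1 > (16 : Int) ^ sz) ↔ sz < (Nat.size m + 3) / 4 := by
  have h1 : ((m : Int) + 1 > (16 : Int) ^ sz) ↔ (16 : Nat) ^ sz ≤ m := by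
    constructor
    · intro h
      have : ((16 : Nat) ^ sz : Int) < (m : Int) + 1 := by push_cast; omega
      omega
    · intro h
      have : ((16 : Nat) ^ sz : Int) ≤ (m : Int) := by exact_mod_cast h
      push_cast at this ⊢; omega
  have h2 : (16 : Nat) ^ sz = 2 ^ (4 * sz) := by
    rw [pow_mul]; norm_num
  have h3 : (2 ^ (4 * sz) ≤ m) ↔ 4 * sz < Nat.size m := (Nat.lt_size).symm
  rw [h1, h2, h3]
  omega

lemma modFindSz_eq_aux (m : Nat) (hm : 1 ≤ m) :
    ∀ k sz, (Nat.size m + 3) / 4 - sz = k → sz ≤ (Nat.size m + 3) / 4 →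
      modFindSz (m : Int) sz = (Nat.size m + 3) / 4 := by
  intro k
  induction k with
  | zero =>
    intro sz hk hle
    have hsz : sz = (Nat.size m + 3) / 4 := by omega
    rw [modFindSz, if_neg]
    · exact hsz
    · rw [modFindSz_cond m sz hm]; omega
  | succ k ih =>
    intro sz hk hle
    rw [modFindSz, if_pos]
    · exact ih (sz + 1) (by omega) (by omega)
    · rw [modFindSz_cond m sz hm]; omega

lemma modFindSz_eq (m : Nat) (hm : 1 ≤ m) :
    modFindSz (m : Int) 0 = (Nat.size m + 3) / 4 :=
  modFindSz_eq_aux m hm _ 0 rfl (by omega)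

-- ===== VERDICT (by name: the statement is the Claim_ definition above) =====
theorem modulate_int_spec : Claim_equal_modulate_int := by
  intro n _
  unfold Spec_modulate_int modulate_int modulate_int_alt
  by_cases h0 : n = 0
  · simp [h0]
  · rw [if_neg h0, if_neg h0]
    by_cases hpos : n ≥ 0
    · have hm : n = ((n.natAbs : Nat) : Int) := by omega
      have h1 : 1 ≤ n.natAbs := by omega
      simp only [if_pos hpos]
      rw [hm, modFindSz_eq n.natAbs h1]
      have habs : |n|.toNat = n.natAbs := by
        rcases abs_cases n with ⟨h, _⟩ | ⟨h, _⟩ <;> rw [h] <;> omega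
      have habs2 : |n|.natAbs = n.natAbs := by
        rcases abs_cases n with ⟨h, _⟩ | ⟨h, _⟩ <;> rw [h] <;> omega
      simp [habs, habs2]
    · have hm : -n = ((n.natAbs : Nat) : Int) := by omega
      have h1 : 1 ≤ n.natAbs := by omega
      simp only [if_neg hpos]
      rw [hm, modFindSz_eq n.natAbs h1]
      have habs : |n|.toNat = n.natAbs := by
        rcases abs_cases n with ⟨h, _⟩ | ⟨h, _⟩ <;> rw [h] <;> omega
      simp [habs]
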